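-- pv_equiv track=rewrite | github.com/frisedel/advent2021 | 2021/day10/adv10.py | adv10_2
-- ===== SOURCE A (Python) =====
-- from typing import List
--
-- open_close = {'(': ')', '[': ']', '{': '}', '<': '>'}
--
-- def find_closing(syntax_index: int, syntax_line: List[str]):
--     depth = 0
--     for next_char in range(syntax_index, len(syntax_line)):
--         if syntax_line[next_char] in open_close.keys():
--             depth += 1
--         else:
--             depth -= 1
--             if depth == 0:
--                 return syntax_line[next_char]
--
-- def find_error(syntax_line: List[str]) -> str:
--     for index in range(len(syntax_line)):
--         if syntax_line[index] in open_close.keys():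
--             opening = syntax_line[index]
--             closing = find_closing(index, syntax_line)
--             if closing != None and open_close[opening] != closing:
--                 return closing
--     return None
--
-- def get_missing_chars(incomplete_line: List[str]) -> List[str]:
--     missing_chars: List[str] = []
--     for index in range(len(incomplete_line)):
--         if incomplete_line[index] in open_close.keys():
--             closing = find_closing(index, incomplete_line)
--             if closing == None:
--                 opening = incomplete_line[index]
--                 missing_chars.append(open_close[opening])
--     missing_chars.reverse()
--     return missing_chars
--
-- def adv10_2(syntax_data: List[List[str]]):
--     incomplete_syntax: List[List[str]] = []
--     for line in syntax_data:
--         error = find_error(line)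
--         if error == None:
--             incomplete_syntax.append(line)
--
--     missing_chars: List[List[str]] = []
--     for line in incomplete_syntax:
--         missing_chars.append(get_missing_chars(line))
--
--     scores = []
--     for missing in missing_chars:
--         line_score = 0
--         for char in missing:
--             char_score = 0
--             if char == ')':
--                 char_score = 1
--             if char == ']':
--                 char_score = 2
--             if char == '}':
--                 char_score = 3
--             if char == '>':
--                 char_score = 4
--             line_score = (line_score * 5) + char_score
--         scores.append(line_score)
--     scores.sort()
--     return scores[int((len(scores)-1)/2)]
-- ===== SOURCE B (Python) =====
-- from typing import List
--
-- open_close = {'(': ')', '[': ']', '{': '}', '<': '>'}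
-- points = {')': 1, ']': 2, '}': 3, '>': 4}
--
-- def adv10_2(syntax_data: List[List[str]]):
--     scores = []
--     for line in syntax_data:
--         stack = []
--         corrupted = False
--         for ch in line:
--             if ch in open_close:
--                 stack.append(ch)
--             elif stack:
--                 if open_close[stack.pop()] != ch:
--                     corrupted = True
--                     break
--         if corrupted:
--             continue
--         score = 0
--         for opener in reversed(stack):
--             score = score * 5 + points[open_close[opener]]
--         scores.append(score)
--     scores.sort()
--     return scores[(len(scores) - 1) // 2]
-- ===== Notes on version B (the rewrite author's own statement) =====
-- stated objective: faster
-- what changed: Replaces A's per-opener lookahead scans (find_closing rescans the rest of the line for every opening bracket, in three pipeline passes) with a single stack pass per line that detects corruption and yields the leftover-stack completion score directly.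
import Mathlib
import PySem

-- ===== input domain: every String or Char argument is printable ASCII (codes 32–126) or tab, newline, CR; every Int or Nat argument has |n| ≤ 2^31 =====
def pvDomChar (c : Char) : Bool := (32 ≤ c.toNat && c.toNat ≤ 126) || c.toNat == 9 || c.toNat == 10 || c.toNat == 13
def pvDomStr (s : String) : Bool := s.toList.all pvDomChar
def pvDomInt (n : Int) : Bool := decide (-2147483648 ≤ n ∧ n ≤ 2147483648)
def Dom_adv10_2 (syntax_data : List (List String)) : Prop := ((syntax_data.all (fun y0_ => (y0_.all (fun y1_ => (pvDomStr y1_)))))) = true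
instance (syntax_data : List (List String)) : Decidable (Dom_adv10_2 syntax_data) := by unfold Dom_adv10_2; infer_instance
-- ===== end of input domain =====

-- B replaces A's per-opener O(n²) lookahead scans with one O(n) stack pass per line (same middle autocomplete score).


-- ===== PORT A =====
-- open_close dict (lookup; membership in its keys = isSome)
def openClose (c : String) : Option String :=
  if c = "(" then some ")" else if c = "[" then some "]"
  else if c = "{" then some "}" else if c = "<" then some ">" else none

-- find_closing's loop 'for next_char in range(syntax_index, len(...))' over the suffix starting
-- at the opener, carrying depth; called as fcGo (line-suffix-from-index) 0
def fcGo : List String → Int → Option String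
  | [], _ => none
  | c :: rest, depth =>
    if (openClose c).isSome then fcGo rest (depth + 1)
    else if depth - 1 = 0 then some c else fcGo rest (depth - 1)

-- find_error's index loop, as recursion over the suffixes (find_closing(index, line) scans
-- exactly the suffix from index, so the index loop is this suffix recursion)
def feGo : List String → Option String
  | [] => none
  | c :: rest =>
    if (openClose c).isSome then
      match fcGo (c :: rest) 0 with
      | some closing => if openClose c = some closing then feGo rest else some closing
      | none => feGo rest
    else feGo rest

def find_error (syntax_line : List String) : Option String := feGo syntax_line

-- get_missing_chars' index loop (same suffix recursion), then the final reverse()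
def gmGo : List String → List String
  | [] => []
  | c :: rest =>
    if (openClose c).isSome then
      match fcGo (c :: rest) 0 with
      | none => ((openClose c).getD "") :: gmGo rest
      | some _ => gmGo rest
    else gmGo rest

def get_missing_chars (incomplete_line : List String) : List String := (gmGo incomplete_line).reverse

-- the four successive 'if char == …: char_score = …' assignments
def charScore (ch : String) : Int :=
  let s : Int := 0
  let s := if ch = ")" then 1 else s
  let s := if ch = "]" then 2 else s
  let s := if ch = "}" then 3 else s
  let s := if ch = ">" then 4 else s
  s

def adv10_2 (syntax_data : List (List String)) : Int :=
  let incomplete := syntax_data.foldl (fun acc line => if find_error line = none then acc ++ [line] else acc) []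
  let missing := incomplete.foldl (fun acc line => acc ++ [get_missing_chars line]) []
  let scores := missing.foldl (fun acc m => acc ++ [m.foldl (fun ls ch => ls * 5 + charScore ch) 0]) ([] : List Int)
  let sorted := PySem.List.sorted scores (fun x => x) false
  -- scores[int((len(scores)-1)/2)] ; int(...) truncates toward zero = tdiv; IndexError (none) excluded by Pre_
  (PySem.List.pyGet? sorted (((sorted.length : Int) - 1).tdiv 2)).getD 0

-- ===== PORT B =====
-- the single stack pass of Source B: push openers, pop on a closer (ignored when the stack is
-- empty), None = corrupted (break), otherwise the leftover stack (head = top)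
def stackRun : List String → List String → Option (List String)
  | s, [] => some s
  | s, c :: rest =>
    if (openClose c).isSome then stackRun (c :: s) rest
    else match s with
      | [] => stackRun [] rest
      | t :: s' => if ((openClose t).getD "") = c then stackRun s' rest else none

-- the points dict of Source B (its keys are the four closers; others never looked up)
def ptsInt (c : String) : Int :=
  if c = ")" then 1 else if c = "]" then 2 else if c = "}" then 3 else if c = ">" then 4 else 0

-- per line: None if corrupted, else the autocomplete score of the leftover stack (top first)
def scoreLine (line : List String) : Option Int :=
  (stackRun [] line).map (fun st => st.foldl (fun acc t => acc * 5 + ptsInt ((openClose t).getD "")) 0)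

def adv10_2_alt (syntax_data : List (List String)) : Int :=
  let scores := syntax_data.filterMap scoreLine
  let sorted := PySem.List.sorted scores (fun x => x) false
  -- scores[(len(scores)-1)//2] ; IndexError (none) excluded by Pre_
  (PySem.List.pyGet? sorted (PySem.Int.floordiv ((sorted.length : Int) - 1) 2)).getD 0

-- ===== PRECONDITION & SPEC =====
-- Pre_ helpers (independent of both ports): a line is "incomplete" (not corrupted) iff a
-- single bracket-stack pass over it never pops a mismatched pair
def pvExpect (c : String) : Option String :=
  if c = "(" then some ")" else if c = "[" then some "]"
  else if c = "{" then some "}" else if c = "<" then some ">" else none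

def pvOk : List String → List String → Bool
  | _, [] => true
  | s, c :: rest =>
    if (pvExpect c).isSome then pvOk (c :: s) rest
    else match s with
      | [] => pvOk [] rest
      | t :: s' => if ((pvExpect t).getD "") = c then pvOk s' rest else false

-- Pre_ excludes exactly the inputs with no incomplete (non-corrupted) line: there A raises
-- IndexError on scores[...] of an empty list, and B raises IndexError there too.
def Pre_adv10_2 (syntax_data : List (List String)) : Prop :=
  ∃ line ∈ syntax_data, pvOk [] line = true
instance (syntax_data : List (List String)) : Decidable (Pre_adv10_2 syntax_data) := by
  unfold Pre_adv10_2; infer_instance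

def pvWitness_adv10_2 : List (List String) := [["(", "[", "]"]]

def Spec_adv10_2 (syntax_data : List (List String)) (out : Int) : Prop := out = adv10_2_alt syntax_data
instance (syntax_data : List (List String)) (out : Int) : Decidable (Spec_adv10_2 syntax_data out) := by unfold Spec_adv10_2; infer_instance

-- ===== CLAIM (what is proved, stated in full; the proofs are below) =====
def Claim_equal_adv10_2 : Prop := ∀ (syntax_data : List (List String)), Dom_adv10_2 syntax_data → Pre_adv10_2 syntax_data → Spec_adv10_2 syntax_data (adv10_2 syntax_data)

-- ===== LEMMAS AND PROOFS =====

-- invariant: each pending opener s[i] (top first) will be popped by the char fcGo finds at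
-- depth i+1, and that pop matches
def InvS (l s : List String) : Prop :=
  ∀ (i : Nat) (x : String), i < s.length → fcGo l ((i : Int) + 1) = some x →
    ((openClose (s.getD i "")).getD "") = x

-- unmatched openers of a line, in position order
def unm : List String → List String
  | [] => []
  | c :: rest =>
    if (openClose c).isSome then
      (if fcGo (c :: rest) 0 = none then c :: unm rest else unm rest)
    else unm rest

-- survivors of a pending stack s at depths d+1, d+2, …
def surv : List String → List String → Nat → List String
  | [], _, _ => []
  | t :: s', l, d =>
    if fcGo l ((d : Int) + 1) = none then t :: surv s' l (d + 1) else surv s' l (d + 1)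

theorem fcGo_cons_open {c : String} (h : (openClose c).isSome) (rest : List String) (d : Int) :
    fcGo (c :: rest) d = fcGo rest (d + 1) := by simp [fcGo, h]

theorem fcGo_cons_close {c : String} (h : ¬ (openClose c).isSome) (rest : List String) (d : Int) :
    fcGo (c :: rest) d = if d - 1 = 0 then some c else fcGo rest (d - 1) := by simp [fcGo, h]

theorem surv_close {c : String} (h : ¬ (openClose c).isSome) (rest : List String) :
    ∀ (s : List String) (d : Nat), surv s (c :: rest) (d + 1) = surv s rest d := by
  intro s
  induction s with
  | nil => intro d; rfl
  | cons t s' ih =>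
    intro d
    have hfc : fcGo (c :: rest) ((d : Int) + 1 + 1) = fcGo rest ((d : Int) + 1) := by
      rw [fcGo_cons_close h, if_neg (by omega)]
      congr 1
      omega
    show surv (t :: s') (c :: rest) (d + 1) = surv (t :: s') rest d
    simp only [surv]
    push_cast
    rw [hfc, ih]

theorem surv_open {c : String} (h : (openClose c).isSome) (rest : List String) :
    ∀ (s : List String) (d : Nat), surv s (c :: rest) d = surv s rest (d + 1) := by
  intro s
  induction s with
  | nil => intro d; rfl
  | cons t s' ih =>
    intro d
    have hfc : fcGo (c :: rest) ((d : Int) + 1) = fcGo rest ((d : Int) + 1 + 1) := by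
      rw [fcGo_cons_open h]
    simp only [surv]
    push_cast
    rw [hfc, ih]

theorem InvS_nil (l : List String) : InvS l [] := by
  intro i x hi; simp at hi

theorem InvS_shift_close {c : String} (h : ¬ (openClose c).isSome) {rest : List String}
    {t : String} {s' : List String} (hinv : InvS (c :: rest) (t :: s')) : InvS rest s' := by
  intro i x hi hfc
  have : fcGo (c :: rest) (((i + 1 : Nat) : Int) + 1) = some x := by
    rw [fcGo_cons_close h, if_neg (by push_cast; omega)]
    have harg : (((i + 1 : Nat) : Int) + 1 - 1) = (i : Int) + 1 := by push_cast; omega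
    rw [harg]; exact hfc
  have := hinv (i + 1) x (by simpa using Nat.succ_lt_succ hi) this
  simpa using this

theorem InvS_shift_open {c : String} (h : (openClose c).isSome) {rest : List String}
    {s : List String}
    (h0 : ∀ x, fcGo rest 1 = some x → ((openClose c).getD "") = x)
    (hinv : InvS (c :: rest) s) : InvS rest (c :: s) := by
  intro i x hi hfc
  cases i with
  | zero =>
    apply h0 x
    rw [show ((0 : Nat) : Int) + 1 = (1 : Int) by norm_num] at hfc
    exact hfc
  | succ j =>
    have : fcGo (c :: rest) (((j : Nat) : Int) + 1) = some x := by
      rw [fcGo_cons_open h]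
      have harg : ((j : Nat) : Int) + 1 + 1 = (((j + 1 : Nat)) : Int) + 1 := by push_cast; omega
      rw [harg]; exact hfc
    have := hinv j x (by simpa using Nat.lt_of_succ_lt_succ hi) this
    simpa using this

-- (iii) a pending opener whose future pop mismatches forces the stack run to None
theorem bad_none : ∀ (l s : List String) (i : Nat) (x : String), i < s.length →
    fcGo l ((i : Int) + 1) = some x → ((openClose (s.getD i "")).getD "") ≠ x →
    stackRun s l = none := by
  intro l
  induction l with
  | nil => intro s i x hi hfc; simp [fcGo] at hfc
  | cons c rest ih =>
    intro s i x hi hfc hbad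
    by_cases hc : (openClose c).isSome
    · rw [fcGo_cons_open hc] at hfc
      have hfc' : fcGo rest (((i + 1 : Nat) : Int) + 1) = some x := by
        have harg : (((i + 1 : Nat)) : Int) + 1 = (i : Int) + 1 + 1 := by push_cast; omega
        rw [harg]; exact hfc
      have := ih (c :: s) (i + 1) x (by simpa using Nat.succ_lt_succ hi) hfc' (by simpa using hbad)
      simpa [stackRun, hc] using this
    · rw [fcGo_cons_close hc] at hfc
      cases i with
      | zero =>
        simp at hfc
        rcases s with _ | ⟨t, s'⟩
        · simp at hi
        · simp only [List.getD_cons_zero] at hbad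
          rw [← hfc] at hbad
          simp [stackRun, hc, hbad]
      | succ j =>
        have hcond : ¬ (((j + 1 : Nat) : Int) + 1 - 1 = 0) := by push_cast; omega
        rw [if_neg hcond] at hfc
        rcases s with _ | ⟨t, s'⟩
        · simp at hi
        · have hfc' : fcGo rest (((j : Nat) : Int) + 1) = some x := by
            convert hfc using 2; push_cast; omega
          have hnone := ih s' j x (by simpa using Nat.lt_of_succ_lt_succ hi) hfc' (by simpa using hbad)
          by_cases hm : ((openClose t).getD "") = c
          · simp [stackRun, hc, hm, hnone]
          · simp [stackRun, hc, hm]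

-- (ii) a corrupted line (find_error finds an error) makes the stack run None
theorem feGo_some_none : ∀ (l s : List String), InvS l s → feGo l ≠ none → stackRun s l = none := by
  intro l
  induction l with
  | nil => intro s _ h; simp [feGo] at h
  | cons c rest ih =>
    intro s hinv hfe
    by_cases hc : (openClose c).isSome
    · cases hm : fcGo (c :: rest) 0 with
      | none =>
        have hfe' : feGo rest ≠ none := by simpa [feGo, hc, hm] using hfe
        have h0 : ∀ x, fcGo rest 1 = some x → ((openClose c).getD "") = x := by
          intro x hx
          rw [fcGo_cons_open hc] at hm
          norm_num at hm
          rw [hm] at hx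
          simp at hx
        have := ih (c :: s) (InvS_shift_open hc h0 hinv) hfe'
        simpa [stackRun, hc] using this
      | some cl =>
        by_cases hchk : openClose c = some cl
        · have hfe' : feGo rest ≠ none := by simpa [feGo, hc, hm, hchk] using hfe
          have h0 : ∀ x, fcGo rest 1 = some x → ((openClose c).getD "") = x := by
            intro x hx
            rw [fcGo_cons_open hc] at hm
            norm_num at hm
            rw [hm] at hx
            obtain rfl : cl = x := by injection hx
            simp [hchk]
          have := ih (c :: s) (InvS_shift_open hc h0 hinv) hfe'
          simpa [stackRun, hc] using this
        · -- the check on c itself fails: index 0 of the new stack is bad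
          have hm' : fcGo rest ((0 : Int) + 1) = some cl := by
            rw [fcGo_cons_open hc] at hm
            norm_num at hm ⊢
            exact hm
          have hbad : ((openClose ((c :: s).getD 0 "")).getD "") ≠ cl := by
            simp only [List.getD_cons_zero]
            intro he
            obtain ⟨e, hoe⟩ := Option.isSome_iff_exists.mp hc
            rw [hoe] at he
            simp at he
            exact hchk (by rw [hoe, he])
          have := bad_none rest (c :: s) 0 cl (by simp) hm' hbad
          simpa [stackRun, hc] using this
    · have hfe' : feGo rest ≠ none := by simpa [feGo, hc] using hfe
      rcases s with _ | ⟨t, s'⟩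
      · have := ih [] (InvS_nil rest) hfe'
        simpa [stackRun, hc] using this
      · have hm : fcGo (c :: rest) ((0 : Int) + 1) = some c := by
          rw [fcGo_cons_close hc]; simp
        have hok : ((openClose t).getD "") = c := by
          have := hinv 0 c (by simp) hm
          simpa using this
        have := ih s' (InvS_shift_close hc hinv) hfe'
        simpa [stackRun, hc, hok] using this

-- (i) an incomplete line: the stack run succeeds and leaves exactly the openers that
-- get_missing_chars sees as unmatched (in reverse position order) above the surviving context
theorem feGo_none_some : ∀ (l s : List String), InvS l s → feGo l = none →
    stackRun s l = some ((unm l).reverse ++ surv s l 0) := by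
  intro l
  induction l with
  | nil =>
    intro s _ _
    have : surv s [] 0 = s := by
      have : ∀ (s : List String) (d : Nat), surv s [] d = s := by
        intro s; induction s with
        | nil => intro d; rfl
        | cons t s' ih => intro d; simp [surv, fcGo, ih]
      exact this s 0
    simp [stackRun, unm, this]
  | cons c rest ih =>
    intro s hinv hfe
    by_cases hc : (openClose c).isSome
    · cases hm : fcGo (c :: rest) 0 with
      | none =>
        have hfe' : feGo rest = none := by simpa [feGo, hc, hm] using hfe
        have h0 : ∀ x, fcGo rest 1 = some x → ((openClose c).getD "") = x := by
          intro x hx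
          rw [fcGo_cons_open hc] at hm
          norm_num at hm
          rw [hm] at hx
          simp at hx
        have hIH := ih (c :: s) (InvS_shift_open hc h0 hinv) hfe'
        have hm1 : fcGo rest 1 = none := by
          rw [fcGo_cons_open hc] at hm; norm_num at hm; exact hm
        have hsurv : surv (c :: s) rest 0 = c :: surv s rest 1 := by
          simp [surv, hm1]
        have hunm : unm (c :: rest) = c :: unm rest := by simp [unm, hc, hm]
        have hsurv2 : surv s (c :: rest) 0 = surv s rest 1 := by
          simpa using surv_open hc rest s 0
        rw [hunm, hsurv2]
        have : stackRun s (c :: rest) = stackRun (c :: s) rest := by simp [stackRun, hc]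
        rw [this, hIH, hsurv]
        simp
      | some cl =>
        have hchk : openClose c = some cl := by
          by_contra hchk
          simp [feGo, hc, hm, hchk] at hfe
        have hfe' : feGo rest = none := by simpa [feGo, hc, hm, hchk] using hfe
        have h0 : ∀ x, fcGo rest 1 = some x → ((openClose c).getD "") = x := by
          intro x hx
          rw [fcGo_cons_open hc] at hm
          norm_num at hm
          rw [hm] at hx
          obtain rfl : cl = x := by injection hx
          simp [hchk]
        have hIH := ih (c :: s) (InvS_shift_open hc h0 hinv) hfe'
        have hm1 : fcGo rest 1 = some cl := by
          rw [fcGo_cons_open hc] at hm; norm_num at hm; exact hm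
        have hsurv : surv (c :: s) rest 0 = surv s rest 1 := by simp [surv, hm1]
        have hunm : unm (c :: rest) = unm rest := by simp [unm, hc, hm]
        have hsurv2 : surv s (c :: rest) 0 = surv s rest 1 := by
          simpa using surv_open hc rest s 0
        rw [hunm, hsurv2]
        have : stackRun s (c :: rest) = stackRun (c :: s) rest := by simp [stackRun, hc]
        rw [this, hIH, hsurv]
    · have hfe' : feGo rest = none := by simpa [feGo, hc] using hfe
      have hunm : unm (c :: rest) = unm rest := by simp [unm, hc]
      rcases s with _ | ⟨t, s'⟩
      · have hIH := ih [] (InvS_nil rest) hfe'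
        have : stackRun [] (c :: rest) = stackRun [] rest := by simp [stackRun, hc]
        rw [this, hIH, hunm]
        simp [surv]
      · have hm : fcGo (c :: rest) ((0 : Int) + 1) = some c := by
          rw [fcGo_cons_close hc]; simp
        have hok : ((openClose t).getD "") = c := by
          have := hinv 0 c (by simp) hm
          simpa using this
        have hIH := ih s' (InvS_shift_close hc hinv) hfe'
        have hsurv : surv (t :: s') (c :: rest) 0 = surv s' rest 0 := by
          have h1 : fcGo (c :: rest) ((0 : Int) + 1) = some c := hm
          simp only [surv]
          rw [show ((0 : Nat) : Int) + 1 = (0 : Int) + 1 by norm_num, h1]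
          simp
          simpa using surv_close hc rest s' 0
        have : stackRun (t :: s') (c :: rest) = stackRun s' rest := by
          simp [stackRun, hc, hok]
        rw [this, hIH, hunm, hsurv]

-- per line: corrupted for A iff None for B
theorem corrupt_iff (l : List String) : stackRun [] l = none ↔ feGo l ≠ none := by
  constructor
  · intro h hfe
    have := feGo_none_some l [] (InvS_nil l) hfe
    rw [h] at this; simp at this
  · intro h
    exact feGo_some_none l [] (InvS_nil l) h

theorem gmGo_eq_unm (l : List String) : gmGo l = (unm l).map (fun t => (openClose t).getD "") := by
  induction l with
  | nil => rfl
  | cons c rest ih =>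
    by_cases hc : (openClose c).isSome
    · cases hm : fcGo (c :: rest) 0 with
      | none => simp [gmGo, unm, hc, hm, ih]
      | some cl => simp [gmGo, unm, hc, hm, ih]
    · simp [gmGo, unm, hc, ih]

theorem charScore_eq_ptsInt (c : String) : charScore c = ptsInt c := by
  unfold charScore ptsInt
  split_ifs <;> simp_all

-- per line: the A-pipeline score of an incomplete line equals B's scoreLine
theorem scoreLine_eq (l : List String) (hfe : feGo l = none) :
    scoreLine l = some ((get_missing_chars l).foldl (fun ls ch => ls * 5 + charScore ch) 0) := by
  have hrun := feGo_none_some l [] (InvS_nil l) hfe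
  unfold scoreLine
  rw [hrun]
  simp only [Option.map_some, Option.some.injEq]
  unfold get_missing_chars
  rw [gmGo_eq_unm]
  rw [← List.map_reverse, List.foldl_map]
  simp only [surv, List.append_nil]
  congr 1
  funext a t
  rw [charScore_eq_ptsInt]

theorem foldl_append_singleton {α β : Type} (f : α → β) :
    ∀ (l : List α) (acc : List β), l.foldl (fun a x => a ++ [f x]) acc = acc ++ l.map f := by
  intro l
  induction l with
  | nil => intro acc; simp
  | cons x xs ih => intro acc; simp [ih]

-- the whole pipeline: A's filtered-and-scored list equals B's filterMap
theorem scores_eq (data : List (List String)) :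
    ((data.filter (fun l => decide (find_error l = none))).map
        (fun l => (get_missing_chars l).foldl (fun ls ch => ls * 5 + charScore ch) 0))
      = data.filterMap scoreLine := by
  simp only [find_error]
  induction data with
  | nil => rfl
  | cons l rest ih =>
    by_cases hfe : feGo l = none
    · have hs := scoreLine_eq l hfe
      simp [hfe, hs, ih]
    · have hnone : scoreLine l = none := by
        unfold scoreLine
        rw [(corrupt_iff l).mpr hfe]
        rfl
      simp [hfe, hnone, ih]

theorem pvExpect_eq_openClose : pvExpect = openClose := rfl

theorem pvOk_iff : ∀ (l s : List String), pvOk s l = (stackRun s l).isSome := by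
  intro l
  induction l with
  | nil => intro s; rfl
  | cons c rest ih =>
    intro s
    by_cases hc : (openClose c).isSome
    · simp [pvOk, stackRun, pvExpect_eq_openClose, hc, ih]
    · rcases s with _ | ⟨t, s'⟩
      · simp [pvOk, stackRun, pvExpect_eq_openClose, hc, ih]
      · by_cases hm : ((openClose t).getD "") = c
        · simp [pvOk, stackRun, pvExpect_eq_openClose, hc, hm, ih]
        · simp [pvOk, stackRun, pvExpect_eq_openClose, hc, hm]

-- ===== VERDICT (by name: the statement is the Claim_ definition above) =====
theorem adv10_2_spec : Claim_equal_adv10_2 := by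
  intro data _ hpre
  unfold Spec_adv10_2
  unfold adv10_2 adv10_2_alt
  -- A's three accumulation loops collapse to filter + map
  simp only [PySem.List.foldl_append_ite_eq_filter, foldl_append_singleton,
    List.nil_append, List.map_map]
  have hsc : ((data.filter (fun l => decide (find_error l = none))).map
      ((fun m => m.foldl (fun ls ch => ls * 5 + charScore ch) 0) ∘ get_missing_chars))
      = data.filterMap scoreLine := by
    rw [← scores_eq data]
    rfl
  rw [hsc]
  -- the scores list is nonempty inside Pre_, so both index formulas agree
  obtain ⟨line, hmem, hok⟩ := hpre
  have hsome : (stackRun [] line).isSome := by rw [← pvOk_iff]; exact hok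
  have hne : data.filterMap scoreLine ≠ [] := by
    intro hnil
    have : scoreLine line ≠ none := by
      unfold scoreLine
      obtain ⟨st, hst⟩ := Option.isSome_iff_exists.mp hsome
      rw [hst]; simp
    obtain ⟨v, hv⟩ := Option.ne_none_iff_exists'.mp this
    have : v ∈ data.filterMap scoreLine := List.mem_filterMap.mpr ⟨line, hmem, hv⟩
    rw [hnil] at this
    exact absurd this (List.not_mem_nil)
  set scores := data.filterMap scoreLine with hscores
  set sorted := PySem.List.sorted scores (fun x => x) false with hsorted
  have hslen : sorted ≠ [] := by
    intro h
    exact hne ((PySem.List.sorted_eq_nil_iff scores (fun x => x) false).mp h)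
  have hlen : 0 < sorted.length := List.length_pos_of_ne_nil hslen
  have hidx : ((sorted.length : Int) - 1).tdiv 2 = PySem.Int.floordiv ((sorted.length : Int) - 1) 2 := by
    rw [PySem.Int.floordiv_eq_ediv_of_pos (by omega)]
    rw [Int.tdiv_eq_ediv]
    omega
  rw [hidx]
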